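-- pv_equiv track=rewrite | github.com/ployns/Datastruc_grader | Sort/63010492_3.py | drome
-- ===== SOURCE A (Python) =====
-- def drome(lst):
--     des = True
--     asc = True
--     unique = True
--     same = True
--     unique_lst = []
--     for i in range(len(lst)-1):
--         if lst[i] < lst[i+1]:
--             des = False
--         if lst[i] > lst[i+1]:
--             asc = False
--         if lst[i] in unique_lst:
--             unique = False
--         if lst[i] != lst[i+1]:
--             same = False
--         unique_lst.append(lst[i])
--     if lst[len(lst)-1] in unique_lst:
--         unique = False
--
--     # do in this order to prevent bug (can also change condition to fix this but i'm too lazy)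
--     if same:
--         return "Repdrome"
--     elif asc and unique:
--         return "Metadrome"
--     elif asc and not unique:
--         return "Plaindrome"
--     elif des and unique:
--         return "Katadrome"
--     elif des and not unique:
--         return "Nialpdrome"
--     else:
--         return "Nondrome"
-- ===== SOURCE B (Python) =====
-- def drome(lst):
--     s = sorted(lst)
--     asc = lst == s
--     des = lst == sorted(lst, reverse=True)
--     unique = all(x != y for x, y in zip(s, s[1:]))
--     same = lst.count(lst[0]) == len(lst)
--     if same:
--         return "Repdrome"
--     elif asc:
--         return "Metadrome" if unique else "Plaindrome"
--     elif des:
--         return "Katadrome" if unique else "Nialpdrome"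
--     else:
--         return "Nondrome"
-- ===== Notes on version B (the rewrite author's own statement) =====
-- stated objective: faster
-- what changed: Replaces the adjacency loop with O(n) list-membership tests by sorting once: asc/des compare lst to its sorted orders, duplicates are found as an equal adjacent pair of the sorted list, and 'same' is a single count; the decision cascade is unchanged.
import Mathlib
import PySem

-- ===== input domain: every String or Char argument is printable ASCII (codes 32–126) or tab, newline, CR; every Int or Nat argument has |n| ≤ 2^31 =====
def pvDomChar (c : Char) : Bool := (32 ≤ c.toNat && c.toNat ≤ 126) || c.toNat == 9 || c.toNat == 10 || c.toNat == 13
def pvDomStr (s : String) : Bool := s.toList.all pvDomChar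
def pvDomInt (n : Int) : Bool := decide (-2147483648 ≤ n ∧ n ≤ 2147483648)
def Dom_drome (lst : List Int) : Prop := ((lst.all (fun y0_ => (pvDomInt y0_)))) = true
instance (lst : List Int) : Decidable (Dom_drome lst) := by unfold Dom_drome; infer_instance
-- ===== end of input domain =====

-- B sorts the list once and derives the four flags from the sorted order instead of A's
-- adjacency pass with linear membership tests (objective: faster).


-- ===== PORT A =====
-- the loop over i in range(len(lst)-1) reading lst[i], lst[i+1], as the obvious structural
-- recursion over adjacent pairs carrying the same five-component state
def dromeLoop : List Int → Bool → Bool → Bool → Bool → List Int → Bool × Bool × Bool × Bool × List Int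
  | a :: b :: rest, des, asc, unique, same, ul =>
      dromeLoop (b :: rest)
        (if a < b then false else des)
        (if b < a then false else asc)
        (if ul.contains a then false else unique)
        (if a ≠ b then false else same)
        (ul ++ [a])
  | _, des, asc, unique, same, ul => (des, asc, unique, same, ul)

def drome (lst : List Int) : String :=
  let r := dromeLoop lst true true true true []
  let des := r.1
  let asc := r.2.1
  let unique0 := r.2.2.1
  let same := r.2.2.2.1
  let ul := r.2.2.2.2
  -- lst[len(lst)-1]; in range whenever lst ≠ [] (Pre_), default 0 otherwise
  let last := PySem.List.pyGetD lst ((lst.length : Int) - 1) 0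
  let unique := if ul.contains last then false else unique0
  if same then "Repdrome"
  else if asc && unique then "Metadrome"
  else if asc && !unique then "Plaindrome"
  else if des && unique then "Katadrome"
  else if des && !unique then "Nialpdrome"
  else "Nondrome"

-- ===== PORT B =====
def drome_alt (lst : List Int) : String :=
  let s := PySem.List.sorted lst (fun x => x) false
  let asc := lst == s
  let des := lst == PySem.List.sorted lst (fun x => x) true
  let unique := (s.zip (PySem.List.slice s (some 1) none)).all (fun p => p.1 != p.2)
  -- lst[0]; in range whenever lst ≠ [] (Pre_), default 0 otherwise
  let same := PySem.List.count lst (PySem.List.pyGetD lst 0 0) == (lst.length : Int)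
  if same then "Repdrome"
  else if asc then (if unique then "Metadrome" else "Plaindrome")
  else if des then (if unique then "Katadrome" else "Nialpdrome")
  else "Nondrome"

-- ===== PRECONDITION & SPEC =====
-- Pre_ excludes only the empty list, on which both Pythons raise IndexError (lst[-1] / lst[0]).
def Pre_drome (lst : List Int) : Prop := lst ≠ []
instance (lst : List Int) : Decidable (Pre_drome lst) := by unfold Pre_drome; infer_instance
def pvWitness_drome : List Int := ([1, 2, 2])
def Spec_drome (lst : List Int) (out : String) : Prop := out = drome_alt lst
instance (lst : List Int) (out : String) : Decidable (Spec_drome lst out) := by unfold Spec_drome; infer_instance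

-- ===== CLAIM (what is proved, stated in full; the proofs are below) =====
def Claim_equal_drome : Prop := ∀ (lst : List Int), Dom_drome lst → Pre_drome lst → Spec_drome lst (drome lst)

-- ===== LEMMAS AND PROOFS =====

-- the uniqueness step of A's loop, as one Bool equation
lemma uniq_step (a : Int) (d ul : List Int) (unique : Bool) :
    ((if ul.contains a then false else unique) &&
      decide (d.Nodup ∧ ∀ x ∈ d, x ∉ ul ++ [a])) =
    (unique && decide ((a :: d).Nodup ∧ ∀ x ∈ a :: d, x ∉ ul)) := by
  by_cases h : a ∈ ul
  · simp [h]
  · simp only [List.contains_eq_mem, h, decide_false, Bool.false_eq_true, if_false]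
    cases unique
    · simp
    · rw [Bool.true_and, Bool.true_and, decide_eq_decide]
      constructor
      · rintro ⟨hnd, hall⟩
        refine ⟨List.nodup_cons.mpr ⟨fun hd => (hall a hd) (by simp), hnd⟩, ?_⟩
        intro x hx
        rcases List.mem_cons.mp hx with rfl | hx
        · exact h
        · exact fun hxu => (hall x hx) (List.mem_append.mpr (Or.inl hxu))
      · rintro ⟨hnd, hall⟩
        obtain ⟨had, hnd'⟩ := List.nodup_cons.mp hnd
        refine ⟨hnd', fun x hx hxm => ?_⟩
        rcases List.mem_append.mp hxm with hm | hm
        · exact (hall x (List.mem_cons.mpr (Or.inr hx))) hm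
        · rcases List.mem_singleton.mp hm with rfl
          exact had hx

-- characterisation of A's loop
lemma dromeLoop_spec (xs : List Int) (des asc unique same : Bool) (ul : List Int) :
    dromeLoop xs des asc unique same ul =
      (des && decide (xs.IsChain (fun a b => ¬ a < b)),
       asc && decide (xs.IsChain (fun a b => ¬ b < a)),
       unique && decide (xs.dropLast.Nodup ∧ ∀ x ∈ xs.dropLast, x ∉ ul),
       same && decide (xs.IsChain (· = ·)),
       ul ++ xs.dropLast) := by
  induction xs generalizing des asc unique same ul with
  | nil => simp [dromeLoop]
  | cons a t ih =>
    cases t with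
    | nil => simp [dromeLoop]
    | cons b r =>
      rw [dromeLoop, ih]
      have hdl : (a :: b :: r).dropLast = a :: (b :: r).dropLast := rfl
      refine Prod.ext ?_ (Prod.ext ?_ (Prod.ext ?_ (Prod.ext ?_ ?_)))
      · by_cases h : a < b <;>
          simp [h, List.isChain_cons_cons, not_lt.1]
      · by_cases h : b < a <;>
          simp [h, List.isChain_cons_cons, le_of_not_gt]
      · rw [hdl]
        exact uniq_step a ((b :: r).dropLast) ul unique
      · by_cases h : a = b <;>
          simp [h, List.isChain_cons_cons]
      · rw [hdl]; simp

lemma isChain_eq_iff (x : Int) (xs : List Int) :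
    (x :: xs).IsChain (· = ·) ↔ ∀ y ∈ xs, y = x := by
  induction xs generalizing x with
  | nil => simp
  | cons b t ih =>
    rw [List.isChain_cons_cons, ih b]
    constructor
    · rintro ⟨rfl, h⟩ y hy
      rcases List.mem_cons.mp hy with rfl | hy
      · rfl
      · exact h y hy
    · intro h
      have hb : x = b := (h b (by simp)).symm
      subst hb
      exact ⟨rfl, fun y hy => h y (by simp [hy])⟩

lemma zip_tail_ne_iff (s : List Int) :
    ((s.zip s.tail).all (fun p => p.1 != p.2)) = true ↔ s.IsChain (· ≠ ·) := by
  induction s with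
  | nil => simp
  | cons a t ih =>
    cases t with
    | nil => simp
    | cons b r =>
      rw [List.isChain_cons_cons, ← ih]
      simp

lemma isChain_and (R S : Int → Int → Prop) (xs : List Int)
    (h1 : xs.IsChain R) (h2 : xs.IsChain S) : xs.IsChain (fun a b => R a b ∧ S a b) := by
  induction xs with
  | nil => simp
  | cons a t ih =>
    cases t with
    | nil => simp
    | cons b r =>
      rw [List.isChain_cons_cons] at *
      exact ⟨⟨h1.1, h2.1⟩, ih h1.2 h2.2⟩

-- B's uniqueness flag reads lst.Nodup
lemma unique_flag_iff (lst : List Int) :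
    ((PySem.List.sorted lst (fun x => x) false).IsChain (· ≠ ·)) ↔ lst.Nodup := by
  have hperm := PySem.List.sorted_perm lst (fun x => x) false
  have hpw := PySem.List.sorted_pairwise lst (fun x => x)
  constructor
  · intro h
    have hc : (PySem.List.sorted lst (fun x => x) false).IsChain (fun a b => a ≤ b ∧ a ≠ b) :=
      isChain_and _ _ _ hpw.isChain h
    have hlt : (PySem.List.sorted lst (fun x => x) false).IsChain (· < ·) :=
      hc.imp (by intro a b hab; exact lt_iff_le_and_ne.mpr hab)
    have hnd : (PySem.List.sorted lst (fun x => x) false).Nodup :=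
      List.nodup_iff_pairwise_ne.mpr (hlt.pairwise.imp (by intro a b hab; exact ne_of_lt hab))
    exact hperm.nodup_iff.mp hnd
  · intro h
    exact (List.nodup_iff_pairwise_ne.mp (hperm.nodup_iff.mpr h)).isChain

lemma asc_flag_iff (lst : List Int) :
    lst = PySem.List.sorted lst (fun x => x) false ↔ lst.IsChain (fun a b => ¬ b < a) := by
  constructor
  · intro h
    have hpw := PySem.List.sorted_pairwise lst (fun x => x)
    rw [← h] at hpw
    exact hpw.isChain.imp (by intro a b hab; exact not_lt.mpr hab)
  · intro h
    have hch : lst.IsChain (· ≤ ·) := h.imp (by intro a b hab; exact not_lt.mp hab)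
    exact (PySem.List.sorted_eq_self_of_pairwise lst (fun x => x) hch.pairwise).symm

lemma des_flag_iff (lst : List Int) :
    lst = PySem.List.sorted lst (fun x => x) true ↔ lst.IsChain (fun a b => ¬ a < b) := by
  constructor
  · intro h
    have hpw := PySem.List.sorted_pairwise_rev lst (fun x => x)
    rw [← h] at hpw
    exact hpw.isChain.imp (by intro a b hab; exact not_lt.mpr hab)
  · intro h
    have hch : lst.IsChain (fun a b => b ≤ a) := h.imp (by intro a b hab; exact not_lt.mp hab)
    exact (PySem.List.sorted_rev_eq_self_of_pairwise lst (fun x => x) hch.pairwise).symm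

-- the two decision cascades agree once the four flags agree
lemma cascade_eq (des asc unique same : Bool) :
    (if same then "Repdrome"
     else if asc && unique then "Metadrome"
     else if asc && !unique then "Plaindrome"
     else if des && unique then "Katadrome"
     else if des && !unique then "Nialpdrome"
     else "Nondrome") =
    (if same then "Repdrome"
     else if asc then (if unique then "Metadrome" else "Plaindrome")
     else if des then (if unique then "Katadrome" else "Nialpdrome")
     else "Nondrome") := by
  cases des <;> cases asc <;> cases unique <;> cases same <;> rfl

-- ===== VERDICT (by name: the statement is the Claim_ definition above) =====
theorem drome_spec : Claim_equal_drome := by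
  intro lst _ hpre
  unfold Spec_drome
  match lst, hpre with
  | x :: xs, _ =>
    have hne : x :: xs ≠ [] := by simp
    rw [drome, drome_alt]
    simp only [dromeLoop_spec, List.nil_append, List.not_mem_nil, not_false_iff, imp_true_iff,
      and_true, Bool.true_and]
    -- A's last element
    have hlen : ((x :: xs).length : Int) - 1 = ((xs.length : Nat) : Int) := by
      simp [List.length_cons]
    have hlast : PySem.List.pyGetD (x :: xs) (((x :: xs).length : Int) - 1) 0
        = (x :: xs).getLast hne := by
      rw [hlen, PySem.List.pyGetD_natCast, List.getLast_eq_getElem]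
      simp [List.getD_eq_getElem?_getD]
      rfl
    rw [hlast]
    -- A's final uniqueness flag is Nodup
    have hnd : (x :: xs).Nodup ↔
        (x :: xs).dropLast.Nodup ∧ (x :: xs).getLast hne ∉ (x :: xs).dropLast := by
      have hsplit : (x :: xs).dropLast ++ [(x :: xs).getLast hne] = x :: xs :=
        List.dropLast_append_getLast hne
      have h0 : ((x :: xs).dropLast ++ [(x :: xs).getLast hne]).Nodup ↔
          (x :: xs).dropLast.Nodup ∧ (x :: xs).getLast hne ∉ (x :: xs).dropLast := by
        rw [List.nodup_append]
        constructor
        · rintro ⟨h1, _, h3⟩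
          exact ⟨h1, fun hm => h3 _ hm _ (List.mem_singleton_self _) rfl⟩
        · rintro ⟨h1, h2⟩
          refine ⟨h1, List.nodup_singleton _, fun a ha b hb => ?_⟩
          rcases List.mem_singleton.mp hb with rfl
          exact fun he => h2 (he ▸ ha)
      rw [hsplit] at h0
      exact h0
    have huniqA : (if ((x :: xs).dropLast).contains ((x :: xs).getLast hne) then false
          else decide ((x :: xs).dropLast.Nodup)) = decide ((x :: xs).Nodup) := by
      by_cases h : (x :: xs).getLast hne ∈ (x :: xs).dropLast
      · rw [if_pos (by simpa using h)]
        symm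
        rw [decide_eq_false_iff_not, hnd]
        exact fun hh => hh.2 h
      · rw [if_neg (by simpa using h), decide_eq_decide, hnd]
        tauto
    rw [huniqA]
    -- B's flags
    have hasc : ((x :: xs) == PySem.List.sorted (x :: xs) (fun x => x) false)
        = decide ((x :: xs).IsChain (fun a b => ¬ b < a)) := by
      by_cases h : (x :: xs) = PySem.List.sorted (x :: xs) (fun x => x) false
      · rw [beq_iff_eq.mpr h, eq_comm, decide_eq_true_eq]
        exact (asc_flag_iff (x :: xs)).mp h
      · rw [beq_eq_false_iff_ne.mpr h, eq_comm, decide_eq_false_iff_not]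
        exact fun hc => h ((asc_flag_iff (x :: xs)).mpr hc)
    have hdes : ((x :: xs) == PySem.List.sorted (x :: xs) (fun x => x) true)
        = decide ((x :: xs).IsChain (fun a b => ¬ a < b)) := by
      by_cases h : (x :: xs) = PySem.List.sorted (x :: xs) (fun x => x) true
      · rw [beq_iff_eq.mpr h, eq_comm, decide_eq_true_eq]
        exact (des_flag_iff (x :: xs)).mp h
      · rw [beq_eq_false_iff_ne.mpr h, eq_comm, decide_eq_false_iff_not]
        exact fun hc => h ((des_flag_iff (x :: xs)).mpr hc)
    have huniqB : (((PySem.List.sorted (x :: xs) (fun x => x) false).zip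
          (PySem.List.slice (PySem.List.sorted (x :: xs) (fun x => x) false) (some 1) none)).all
            (fun p => p.1 != p.2)) = decide ((x :: xs).Nodup) := by
      rw [PySem.List.slice_from_one]
      by_cases h : (PySem.List.sorted (x :: xs) (fun x => x) false).IsChain (· ≠ ·)
      · rw [(zip_tail_ne_iff _).mpr h, eq_comm, decide_eq_true_eq]
        exact (unique_flag_iff (x :: xs)).mp h
      · have h1 : (((PySem.List.sorted (x :: xs) (fun x => x) false).zip
            (PySem.List.sorted (x :: xs) (fun x => x) false).tail).all
              (fun p => p.1 != p.2)) = false := by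
          rcases Bool.eq_false_or_eq_true _ with hb | hb
          · exact absurd ((zip_tail_ne_iff _).mp hb) h
          · exact hb
        rw [h1, eq_comm, decide_eq_false_iff_not]
        exact fun hc => h ((unique_flag_iff (x :: xs)).mpr hc)
    have hsame : (PySem.List.count (x :: xs) (PySem.List.pyGetD (x :: xs) 0 0)
          == ((x :: xs).length : Int)) = decide ((x :: xs).IsChain (· = ·)) := by
      rw [PySem.List.pyGetD_zero_cons, PySem.List.count_eq]
      by_cases h : ∀ y ∈ xs, y = x
      · have hall : ∀ b ∈ x :: xs, x = b := by
          intro b hb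
          rcases List.mem_cons.mp hb with rfl | hb
          · rfl
          · exact (h b hb).symm
        have hc : ((x :: xs).count x : Int) = ((x :: xs).length : Int) := by
          exact_mod_cast List.count_eq_length.mpr hall
        rw [beq_iff_eq.mpr hc, eq_comm, decide_eq_true_eq, isChain_eq_iff]
        exact h
      · have hcnt : ((x :: xs).count x : Int) ≠ ((x :: xs).length : Int) := by
          intro hc
          have hc' : (x :: xs).count x = (x :: xs).length := by exact_mod_cast hc
          exact h (fun y hy =>
            (List.count_eq_length.mp hc' y (List.mem_cons.mpr (Or.inr hy))).symm)
        rw [beq_eq_false_iff_ne.mpr hcnt, eq_comm, decide_eq_false_iff_not, isChain_eq_iff]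
        exact h
    rw [hasc, hdes, huniqB, hsame]
    exact cascade_eq _ _ _ _
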